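-- pv_equiv track=rewrite | github.com/dicoder4/Digital-Twin-Driven-Flood-Evacuation-System-Using-AI-Optimization | UrbanFloodReact/backend/generate_people.py | _find_best_ward_match
-- ===== SOURCE A (Python) =====
-- def _find_best_ward_match(hobli_norm: str, ward_rows: list) -> dict | None:
--     """
--     Return the best matching ward row for this hobli norm name, or None.
--     Match rules (in priority):
--       1. Exact normalised match
--       2. Hobli norm is contained in ward norm (e.g. "marathahalli" in "marathahalli")
--       3. Ward norm is contained in hobli norm
--     """
--     for ward in ward_rows:
--         wn = ward["norm"]
--         if hobli_norm == wn:
--             return ward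
--     for ward in ward_rows:
--         wn = ward["norm"]
--         if hobli_norm in wn or wn in hobli_norm:
--             # Avoid very short accidental matches (minimum 5 chars)
--             overlap = min(len(hobli_norm), len(wn))
--             if overlap >= 5:
--                 return ward
--     return None
-- ===== SOURCE B (Python) =====
-- def _find_best_ward_match(hobli_norm: str, ward_rows: list) -> dict | None:
--     """Single pass: exact match returns immediately; first qualifying
--     substring match is remembered as a fallback and returned at the end."""
--     fallback = None
--     for ward in ward_rows:
--         wn = ward["norm"]
--         if hobli_norm == wn:
--             return ward
--         if fallback is None and (hobli_norm in wn or wn in hobli_norm) \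
--                 and min(len(hobli_norm), len(wn)) >= 5:
--             fallback = ward
--     return fallback
-- ===== Notes on version B (the rewrite author's own statement) =====
-- stated objective: simpler
-- what changed: Fused A's two sequential scans into a single pass that returns exact matches immediately and remembers the first qualifying substring match as a fallback.
import Mathlib
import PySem

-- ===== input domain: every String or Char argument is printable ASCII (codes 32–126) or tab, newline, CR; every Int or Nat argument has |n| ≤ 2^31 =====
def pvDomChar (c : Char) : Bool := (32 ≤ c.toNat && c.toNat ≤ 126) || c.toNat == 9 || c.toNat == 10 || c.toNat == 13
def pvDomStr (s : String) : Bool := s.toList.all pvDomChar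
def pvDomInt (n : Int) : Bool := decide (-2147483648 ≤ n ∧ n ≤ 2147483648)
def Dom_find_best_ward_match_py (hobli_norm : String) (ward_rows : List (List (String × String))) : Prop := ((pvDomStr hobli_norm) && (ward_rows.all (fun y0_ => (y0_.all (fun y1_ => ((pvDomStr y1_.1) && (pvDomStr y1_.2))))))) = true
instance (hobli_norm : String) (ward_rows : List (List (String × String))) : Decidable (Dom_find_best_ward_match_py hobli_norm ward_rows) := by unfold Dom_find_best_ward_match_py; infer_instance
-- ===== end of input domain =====

-- B fuses A's two sequential scans into one pass (exact match returns at once, first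
-- qualifying substring match kept as fallback); same return value, no side effects.

-- ===== PORT A =====
-- ward["norm"]: first-match association-list lookup; the "" default is only reached
-- outside Pre_ (Python raises KeyError there).
def pvNorm (w : List (String × String)) : String :=
  ((w.find? (fun p => p.1 == "norm")).map Prod.snd).getD ""

def pvLoop1 (h : String) : List (List (String × String)) → Option (List (String × String))
  | [] => none
  | w :: rest => if h == pvNorm w then some w else pvLoop1 h rest

def pvLoop2 (h : String) : List (List (String × String)) → Option (List (String × String))
  | [] => none
  | w :: rest =>
      let wn := pvNorm w
      if PySem.Str.isIn h wn || PySem.Str.isIn wn h then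
        if 5 ≤ min (PySem.Str.len h) (PySem.Str.len wn) then some w else pvLoop2 h rest
      else pvLoop2 h rest

def find_best_ward_match_py (hobli_norm : String) (ward_rows : List (List (String × String))) : Option (List (String × String)) :=
  match pvLoop1 hobli_norm ward_rows with
  | some w => some w
  | none => pvLoop2 hobli_norm ward_rows

-- ===== PORT B =====
def pvLoopB (h : String) (fb : Option (List (String × String))) :
    List (List (String × String)) → Option (List (String × String))
  | [] => fb
  | w :: rest =>
      let wn := pvNorm w
      if h == wn then some w
      else
        pvLoopB h
          (if fb.isNone && (PySem.Str.isIn h wn || PySem.Str.isIn wn h)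
              && decide (5 ≤ min (PySem.Str.len h) (PySem.Str.len wn))
           then some w else fb) rest

def find_best_ward_match_py_alt (hobli_norm : String) (ward_rows : List (List (String × String))) : Option (List (String × String)) :=
  pvLoopB hobli_norm none ward_rows

-- ===== PRECONDITION & SPEC =====
-- Pre_ excludes exactly the inputs on which Python A raises KeyError: a ward without a
-- "norm" key is reached (i.e. no earlier ward is an exact match, so the first loop does
-- not return before touching it).
def Pre_find_best_ward_match_py (hobli_norm : String) (ward_rows : List (List (String × String))) : Prop :=
  ∀ j < ward_rows.length, "norm" ∉ (ward_rows.getD j []).map Prod.fst →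
    ∃ i < j, hobli_norm = pvNorm (ward_rows.getD i [])
instance (hobli_norm : String) (ward_rows : List (List (String × String))) : Decidable (Pre_find_best_ward_match_py hobli_norm ward_rows) := by unfold Pre_find_best_ward_match_py; infer_instance

def pvWitness_find_best_ward_match_py : String × (List (List (String × String))) :=
  ("abcde", [[("norm", "xabcdex")], [("norm", "abcde")]])

def Spec_find_best_ward_match_py (hobli_norm : String) (ward_rows : List (List (String × String))) (out : Option (List (String × String))) : Prop := out = find_best_ward_match_py_alt hobli_norm ward_rows
instance (hobli_norm : String) (ward_rows : List (List (String × String))) (out : Option (List (String × String))) : Decidable (Spec_find_best_ward_match_py hobli_norm ward_rows out) := by unfold Spec_find_best_ward_match_py; infer_instance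

-- ===== CLAIM (what is proved, stated in full; the proofs are below) =====
def Claim_equal_find_best_ward_match_py : Prop := ∀ (hobli_norm : String) (ward_rows : List (List (String × String))), Dom_find_best_ward_match_py hobli_norm ward_rows → Pre_find_best_ward_match_py hobli_norm ward_rows → Spec_find_best_ward_match_py hobli_norm ward_rows (find_best_ward_match_py hobli_norm ward_rows)

-- ===== LEMMAS AND PROOFS =====
-- Invariant of B's single pass: it equals "first exact match, else fallback, else
-- first qualifying substring match".
lemma pvLoopB_eq (h : String) (fb : Option (List (String × String)))
    (rows : List (List (String × String))) :
    pvLoopB h fb rows = (pvLoop1 h rows).or (fb.or (pvLoop2 h rows)) := by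
  induction rows generalizing fb with
  | nil => simp [pvLoopB, pvLoop1, pvLoop2]
  | cons w rest ih =>
      simp only [pvLoopB, pvLoop1, pvLoop2]
      by_cases hex : h == pvNorm w
      · simp [hex]
      · simp only [hex, Bool.false_eq_true]
        rw [ih]
        cases fb with
        | some x => simp
        | none =>
            by_cases hc : (PySem.Chars.isIn h.toList (pvNorm w).toList = true ∨
                PySem.Chars.isIn (pvNorm w).toList h.toList = true)
            · by_cases hl : (5 ≤ h.length ∧ 5 ≤ (pvNorm w).length)
              · simp [hc, hl, Option.or]
              · simp [hc, hl, Option.or]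
            · simp [hc, Option.or]

-- ===== VERDICT (by name: the statement is the Claim_ definition above) =====
theorem find_best_ward_match_py_spec : Claim_equal_find_best_ward_match_py := by
  intro h rows _ _
  unfold Spec_find_best_ward_match_py find_best_ward_match_py find_best_ward_match_py_alt
  rw [pvLoopB_eq]
  cases pvLoop1 h rows <;> simp [Option.or]
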